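-- pv_equiv track=rewrite | github.com/vanpersie9987/vanpersie9987 | luogu1.py | windyNumbers
-- ===== SOURCE A (Python) =====
-- from functools import cache
--
-- def windyNumbers(a: int, b: int) -> int:
--     def solve(s: str) -> int:
--         @cache
--         def dfs(i: int, j: int, is_limit: bool, is_num: bool):
--             if i == n:
--                 return int(is_num)
--             res = 0
--             if not is_num:
--                 res = dfs(i + 1, j, False, False)
--             up = int(s[i]) if is_limit else 9
--             for d in range(0 if is_num else 1, up + 1):
--                 if not is_num or abs(d - j) >= 2:
--                     res += dfs(i + 1, d, is_limit and up == d, True)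
--             return res
--         n = len(s)
--         return dfs(0, 0, True, False)
--     return solve(str(b)) - solve(str(a - 1))
-- ===== SOURCE B (Python) =====
-- def windyNumbers(a: int, b: int) -> int:
--     # Iterative digit-DP: precompute a table F[k][d] = number of windy
--     # completions of length k whose previous digit is d, then count numbers
--     # shorter than s in one closed pass and walk s once keeping the tight prefix.
--     def count(s: str) -> int:
--         n = len(s)
--         F = [[1] * 10]
--         prev = F[0]
--         for _ in range(1, n):
--             prev = [sum(v for x, v in enumerate(prev) if abs(x - last) >= 2)
--                     for last in range(10)]
--             F.append(prev)
--         total = sum(sum(row[1:]) for row in F[:-1])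
--         if s == "0":
--             return total
--         rows = F[::-1]
--
--         def walk(pairs, first, prevd):
--             if not pairs:
--                 return 1
--             (c, row), rest = pairs[0], pairs[1:]
--             d = ord(c) - 48
--             t = sum(v for x, v in enumerate(row[:d])
--                     if x >= (1 if first else 0) and (first or abs(x - prevd) >= 2))
--             if not first and abs(d - prevd) < 2:
--                 return t
--             return t + walk(rest, False, d)
--
--         return total + walk(list(zip(s, rows)), True, 0)
--
--     return count(str(b)) - count(str(a - 1))
-- ===== Notes on version B (the rewrite author's own statement) =====
-- stated objective: alternative
-- what changed: Replaces A's memoized top-down dfs over (position, prev digit, tight, started) with an iterative bottom-up DP: a precomputed table F[k][d] of windy completions of length k after digit d, a closed pass summing all shorter lengths, and a single left-to-right tight-prefix walk over the digit string.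
import Mathlib
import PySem

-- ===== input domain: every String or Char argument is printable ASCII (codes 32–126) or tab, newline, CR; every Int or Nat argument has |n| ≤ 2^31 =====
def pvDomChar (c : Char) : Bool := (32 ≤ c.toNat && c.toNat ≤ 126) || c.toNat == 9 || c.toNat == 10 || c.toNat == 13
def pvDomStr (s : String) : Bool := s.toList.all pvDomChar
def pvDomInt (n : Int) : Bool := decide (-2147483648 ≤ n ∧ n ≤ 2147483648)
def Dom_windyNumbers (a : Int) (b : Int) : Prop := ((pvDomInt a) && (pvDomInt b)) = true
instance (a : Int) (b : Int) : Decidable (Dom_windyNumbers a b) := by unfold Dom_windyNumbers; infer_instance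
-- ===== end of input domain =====

set_option maxRecDepth 8000


-- B replaces A's memoized top-down digit DP by an iterative bottom-up table of
-- windy-completion counts plus a single tight-prefix walk (objective: alternative).

-- ===== PORT A =====
-- dfs(i, j, is_limit, is_num) of A, with the remaining length k = n - i as the
-- structural recursion argument (Python's `i == n` test is exactly `k == 0`), and
-- functools.cache ported as an explicitly threaded memo dict keyed by (i, j, is_limit, is_num).
-- int(s[i]) is ported as PySem.Int.ofChars? [c] (int of the one-character string s[i]);
-- none = Python's ValueError, which the Option threading propagates like the exception
-- (once an exception occurs the memo state no longer matters).
-- body of A's `for d in range(...)` loop, with `rec` the recursive call of dfs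
def dfsAStep (rec : Int → PySem.Dict (Nat × Int × Bool × Bool) Int →
      Option Int × PySem.Dict (Nat × Int × Bool × Bool) Int) (j : Int) (num : Bool) :
    Option Int × PySem.Dict (Nat × Int × Bool × Bool) Int → Int →
      Option Int × PySem.Dict (Nat × Int × Bool × Bool) Int := fun st d =>
  match st with
  | (none, m') => (none, m')
  | (some r, m') =>
    if num = false ∨ 2 ≤ (d - j).natAbs then
      let ch := rec d m'
      (ch.1.map (fun v => r + v), ch.2)
    else (some r, m')

def dfsA (l : List Char) : Nat → Nat → Int → Bool → Bool →
    PySem.Dict (Nat × Int × Bool × Bool) Int →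
    Option Int × PySem.Dict (Nat × Int × Bool × Bool) Int
  | 0, i, j, lim, num, m =>
    match PySem.Dict.get? m (i, j, lim, num) with
    | some v => (some v, m)
    | none =>
      let r : Int := if num then 1 else 0
      (some r, PySem.Dict.insert m (i, j, lim, num) r)
  | k + 1, i, j, lim, num, m =>
    match PySem.Dict.get? m (i, j, lim, num) with
    | some v => (some v, m)
    | none =>
      let p0 : Option Int × PySem.Dict (Nat × Int × Bool × Bool) Int :=
        if num then (some 0, m) else dfsA l k (i + 1) j false false m
      let up? : Option Int :=
        if lim then (PySem.List.pyGet? l (i : Int)).bind (fun c => PySem.Int.ofChars? [c])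
        else some 9
      match p0, up? with
      | (some r0, m1), some up =>
        let pf :=
          (PySem.List.pyRange (if num then 0 else 1) (up + 1) 1).foldl
            (dfsAStep (fun d m' => dfsA l k (i + 1) d (lim && (up == d)) true m') j num)
            (some r0, m1)
        match pf with
        | (some r, m2) => (some r, PySem.Dict.insert m2 (i, j, lim, num) r)
        | (none, m2) => (none, m2)
      | (some _, m1), none => (none, m1)
      | (none, m1), _ => (none, m1)

def solveA (s : String) : Option Int :=
  (dfsA s.toList s.toList.length 0 0 true false PySem.Dict.empty).1

def windyNumbers (a : Int) (b : Int) : Int :=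
  match solveA (PySem.Int.toStr b), solveA (PySem.Int.toStr (a - 1)) with
  | some x, some y => x - y
  | _, _ => 0  -- Python raises ValueError here ('-' digit); excluded by Pre_windyNumbers

-- ===== PORT B =====
-- next row of the completion table: prev' = [sum(v for x, v in enumerate(prev) if abs(x-last)>=2) for last in range(10)]
def rowNextB (p : List Int) : List Int :=
  (PySem.List.pyRange 0 10 1).map (fun last =>
    (PySem.List.enumerate p).foldl
      (fun acc xv => if 2 ≤ (xv.1 - last).natAbs then acc + xv.2 else acc) 0)

-- F = [[1]*10]; prev = F[0]; for _ in range(1, n): prev = …; F.append(prev)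
def fTabB (n : Nat) : List (List Int) :=
  ((PySem.List.pyRange 1 (n : Int) 1).foldl
    (fun st _ => let q := rowNextB st.2; (st.1 ++ [q], q))
    ([List.replicate 10 (1 : Int)], List.replicate 10 (1 : Int))).1

-- walk(pairs, first, prevd) of Source B, structural on the zipped list
def walkB : List (Char × List Int) → Bool → Int → Int
  | [], _, _ => 1
  | (c, row) :: rest, first, prevd =>
    let d : Int := (c.toNat : Int) - 48
    let t : Int :=
      (PySem.List.enumerate (PySem.List.slice row none (some d))).foldl
        (fun acc xv =>
          if (if first then (1 : Int) else 0) ≤ xv.1 ∧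
              (first = true ∨ 2 ≤ (xv.1 - prevd).natAbs) then acc + xv.2 else acc) 0
    if !first && (d - prevd).natAbs < 2 then t
    else t + walkB rest false d

def countB (s : String) : Int :=
  let n := s.toList.length
  let F := fTabB n
  let total : Int :=
    (PySem.List.slice F none (some (-1))).foldl
      (fun acc row => acc + (PySem.List.slice row (some 1) none).foldl (fun t v => t + v) 0) 0
  if s = "0" then total
  else total + walkB (s.toList.zip ((PySem.List.slice? F none none (-1)).getD [])) true 0

def windyNumbers_alt (a : Int) (b : Int) : Int :=
  countB (PySem.Int.toStr b) - countB (PySem.Int.toStr (a - 1))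

-- ===== PRECONDITION & SPEC =====
-- A raises ValueError when a ≤ 0 or b < 0 (str(a-1) or str(b) then starts with '-',
-- and int('-') fails); Pre_ excludes exactly those inputs.
def Pre_windyNumbers (a : Int) (b : Int) : Prop := 1 ≤ a ∧ 0 ≤ b
instance (a : Int) (b : Int) : Decidable (Pre_windyNumbers a b) := by
  unfold Pre_windyNumbers; infer_instance
def pvWitness_windyNumbers : Int × Int := (1, 15)

def Spec_windyNumbers (a : Int) (b : Int) (out : Int) : Prop := out = windyNumbers_alt a b
instance (a : Int) (b : Int) (out : Int) : Decidable (Spec_windyNumbers a b out) := by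
  unfold Spec_windyNumbers; infer_instance

-- ===== CLAIM (what is proved, stated in full; the proofs are below) =====
def Claim_equal_windyNumbers : Prop := ∀ (a : Int) (b : Int), Dom_windyNumbers a b → Pre_windyNumbers a b → Spec_windyNumbers a b (windyNumbers a b)

-- ===== LEMMAS AND PROOFS =====

-- the memo-free recursion dfsA implements (functools.cache only caches; it does not
-- change the value); all value reasoning happens on dfsP
def dfsP (l : List Char) : Nat → Nat → Int → Bool → Bool → Option Int
  | 0, _, _, _, num => some (if num then 1 else 0)
  | k + 1, i, j, lim, num =>
    let res0 : Option Int := if num then some 0 else dfsP l k (i + 1) j false false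
    let up? : Option Int :=
      if lim then (PySem.List.pyGet? l (i : Int)).bind (fun c => PySem.Int.ofChars? [c])
      else some 9
    match res0, up? with
    | some r0, some up =>
      (PySem.List.pyRange (if num then 0 else 1) (up + 1) 1).foldl
        (fun acc d => acc.bind (fun r =>
          if num = false ∨ 2 ≤ (d - j).natAbs then
            (dfsP l k (i + 1) d (lim && (up == d)) true).map (fun v => r + v)
          else some r)) (some r0)
    | _, _ => none

def MemoInv (l : List Char) (n : Nat) (m : PySem.Dict (Nat × Int × Bool × Bool) Int) : Prop :=
  ∀ (i : Nat) (j : Int) (lim num : Bool) (v : Int),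
    PySem.Dict.get? m (i, j, lim, num) = some v → dfsP l (n - i) i j lim num = some v

lemma foldl_pair_fst {D : Type} (P : D → Prop) (ds : List Int)
    (g : Option Int × D → Int → Option Int × D) (gp : Option Int → Int → Option Int)
    (hstep : ∀ d ∈ ds, ∀ (o : Option Int) (m : D), P m →
      (g (o, m) d).1 = gp o d ∧ P (g (o, m) d).2) :
    ∀ (o : Option Int) (m : D), P m →
      (ds.foldl g (o, m)).1 = ds.foldl gp o ∧ P (ds.foldl g (o, m)).2 := by
  induction ds with
  | nil => intro o m hm; exact ⟨rfl, hm⟩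
  | cons d ds ih =>
    intro o m hm
    obtain ⟨h1, h2⟩ := hstep d (by simp) o m hm
    have hrw : g (o, m) d = ((g (o, m) d).1, (g (o, m) d).2) := rfl
    simp only [List.foldl_cons]
    rw [hrw, h1]
    exact ih (fun x hx => hstep x (by simp [hx])) _ _ h2

lemma dfsA_memo (l : List Char) (n : Nat) : ∀ (k i : Nat) (j : Int) (lim num : Bool)
    (m : PySem.Dict (Nat × Int × Bool × Bool) Int), i + k = n → MemoInv l n m →
    (dfsA l k i j lim num m).1 = dfsP l k i j lim num ∧
      MemoInv l n (dfsA l k i j lim num m).2 := by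
  intro k
  induction k with
  | zero =>
    intro i j lim num m hk hInv
    simp only [dfsA]
    cases hget : PySem.Dict.get? m (i, j, lim, num) with
    | some v =>
      have hv := hInv i j lim num v hget
      rw [show n - i = 0 by omega] at hv
      exact ⟨hv.symm, hInv⟩
    | none =>
      refine ⟨rfl, ?_⟩
      intro i' j' lim' num' v hv
      rw [PySem.Dict.get?_insert] at hv
      by_cases he : (i', j', lim', num') = (i, j, lim, num)
      · rw [if_pos he] at hv
        simp only [Prod.mk.injEq] at he
        obtain ⟨rfl, rfl, rfl, rfl⟩ := he
        rw [show n - i' = 0 by omega]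
        simp only [dfsP]
        exact hv
      · rw [if_neg he] at hv
        exact hInv i' j' lim' num' v hv
  | succ k ih =>
    intro i j lim num m hk hInv
    simp only [dfsA]
    cases hget : PySem.Dict.get? m (i, j, lim, num) with
    | some v =>
      have hv := hInv i j lim num v hget
      rw [show n - i = k + 1 by omega] at hv
      exact ⟨hv.symm, hInv⟩
    | none =>
      have hp0 : (if num then ((some 0 : Option Int), m)
            else dfsA l k (i + 1) j false false m).1
            = (if num then some 0 else dfsP l k (i + 1) j false false) ∧
          MemoInv l n (if num then ((some 0 : Option Int), m)
            else dfsA l k (i + 1) j false false m).2 := by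
        cases num
        · simpa using ih (i + 1) j false false m (by omega) hInv
        · exact ⟨rfl, hInv⟩
      obtain ⟨hp1, hp2⟩ := hp0
      have hD : dfsP l (k + 1) i j lim num =
          (match (if num then some 0 else dfsP l k (i + 1) j false false),
              (if lim then (PySem.List.pyGet? l (i : Int)).bind
                (fun c => PySem.Int.ofChars? [c]) else some 9) with
          | some r0, some up =>
            (PySem.List.pyRange (if num then 0 else 1) (up + 1) 1).foldl
              (fun acc d => acc.bind (fun r =>
                if num = false ∨ 2 ≤ (d - j).natAbs then
                  (dfsP l k (i + 1) d (lim && (up == d)) true).map (fun v => r + v)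
                else some r)) (some r0)
          | _, _ => none) := rfl
      rw [show (if num = true then ((some 0 : Option Int), m)
            else dfsA l k (i + 1) j false false m)
          = ((if num = true then ((some 0 : Option Int), m)
              else dfsA l k (i + 1) j false false m).1,
             (if num = true then ((some 0 : Option Int), m)
              else dfsA l k (i + 1) j false false m).2) from rfl, hp1]
      rw [hD]
      cases hres : (if num = true then (some 0 : Option Int)
          else dfsP l k (i + 1) j false false) with
      | none =>
        exact ⟨rfl, hp2⟩
      | some r0 =>
        cases hup : (if lim = true then (PySem.List.pyGet? l (i : Int)).bind
            (fun c => PySem.Int.ofChars? [c]) else some 9) with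
        | none => exact ⟨rfl, hp2⟩
        | some up =>
          set M2 := (if num = true then ((some 0 : Option Int), m)
            else dfsA l k (i + 1) j false false m).2 with hM2
          obtain ⟨hL1, hL2⟩ := foldl_pair_fst (MemoInv l n)
            (PySem.List.pyRange (if num = true then 0 else 1) (up + 1) 1)
            (dfsAStep (fun d m' => dfsA l k (i + 1) d (lim && (up == d)) true m') j num)
            (fun acc d => acc.bind (fun r =>
              if num = false ∨ 2 ≤ (d - j).natAbs then
                (dfsP l k (i + 1) d (lim && (up == d)) true).map (fun v => r + v)
              else some r))
            (by
              intro d _ o m' hm'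
              cases o with
              | none => exact ⟨rfl, hm'⟩
              | some r =>
                obtain ⟨hc1, hc2⟩ := ih (i + 1) d (lim && (up == d)) true m' (by omega) hm'
                by_cases hcond : num = false ∨ 2 ≤ (d - j).natAbs
                · constructor
                  · simp only [dfsAStep, if_pos hcond, Option.bind_some, hc1]
                  · simp only [dfsAStep, if_pos hcond]; exact hc2
                · constructor
                  · simp only [dfsAStep, if_neg hcond, Option.bind_some]
                  · simp only [dfsAStep, if_neg hcond]; exact hm')
            (some r0) M2 hp2
          show (match (PySem.List.pyRange (if num = true then 0 else 1) (up + 1) 1).foldl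
                  (dfsAStep (fun d m' => dfsA l k (i + 1) d (lim && (up == d)) true m') j num)
                  (some r0, M2) with
              | (some r, m2) => (some r, m2.insert (i, j, lim, num) r)
              | (none, m2) => (none, m2)).1
              = (PySem.List.pyRange (if num = true then 0 else 1) (up + 1) 1).foldl
                  (fun acc d => acc.bind (fun r =>
                    if num = false ∨ 2 ≤ (d - j).natAbs then
                      (dfsP l k (i + 1) d (lim && (up == d)) true).map (fun v => r + v)
                    else some r)) (some r0)
            ∧ MemoInv l n (match (PySem.List.pyRange (if num = true then 0 else 1) (up + 1) 1).foldl
                  (dfsAStep (fun d m' => dfsA l k (i + 1) d (lim && (up == d)) true m') j num)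
                  (some r0, M2) with
              | (some r, m2) => (some r, m2.insert (i, j, lim, num) r)
              | (none, m2) => (none, m2)).2
          obtain ⟨o2, m2', hfold2⟩ : ∃ o2 m2',
              (PySem.List.pyRange (if num = true then 0 else 1) (up + 1) 1).foldl
                (dfsAStep (fun d m' => dfsA l k (i + 1) d (lim && (up == d)) true m') j num)
                (some r0, M2) = (o2, m2') := ⟨_, _, rfl⟩
          rw [hfold2] at hL1 hL2
          rw [hfold2]
          cases o2 with
          | none => exact ⟨hL1, hL2⟩
          | some r =>
            refine ⟨hL1, ?_⟩
            have hval : dfsP l (k + 1) i j lim num = some r := by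
              rw [hD, hres, hup]
              exact hL1.symm
            intro i' j' lim' num' v hv
            rw [PySem.Dict.get?_insert] at hv
            by_cases he : (i', j', lim', num') = (i, j, lim, num)
            · rw [if_pos he] at hv
              simp only [Prod.mk.injEq] at he
              obtain ⟨rfl, rfl, rfl, rfl⟩ := he
              rw [show n - i' = k + 1 by omega, hval]
              exact hv
            · rw [if_neg he] at hv
              exact hL2 i' j' lim' num' v hv


lemma foldl_optAdd (p : Int → Prop) [DecidablePred p] (g : Int → Option Int) (gv : Int → Int)
    (l : List Int) (h : ∀ d ∈ l, p d → g d = some (gv d)) (r0 : Int) :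
    l.foldl (fun acc d => acc.bind (fun r =>
        if p d then (g d).map (fun v => r + v) else some r)) (some r0)
      = some (l.foldl (fun r d => if p d then r + gv d else r) r0) := by
  induction l generalizing r0 with
  | nil => rfl
  | cons x xs ih =>
    simp only [List.foldl_cons, Option.bind_some]
    by_cases hp : p x
    · rw [if_pos hp, if_pos hp, h x (by simp) hp]
      exact ih (fun d hd => h d (by simp [hd])) _
    · rw [if_neg hp, if_neg hp]
      exact ih (fun d hd => h d (by simp [hd])) _

def Fc : Nat → Int → Int
  | 0, _ => 1
  | k + 1, j =>
    (PySem.List.pyRange 0 10 1).foldl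
      (fun r d => if 2 ≤ (d - j).natAbs then r + Fc k d else r) 0

lemma dfsP_free (l : List Char) : ∀ (k i : Nat) (j : Int),
    dfsP l k i j false true = some (Fc k j) := by
  intro k
  induction k with
  | zero => intro i j; rfl
  | succ k ih =>
    intro i j
    simp only [dfsP, if_pos, Bool.false_and, Bool.true_eq_false, Bool.false_eq_true, if_false]
    rw [show ((9:Int)+1) = 10 from rfl]
    rw [foldl_optAdd (fun d => False ∨ 2 ≤ (d - j).natAbs)
      (fun d => dfsP l k (i + 1) d false true) (Fc k)
      _ (fun d _ _ => ih (i+1) d) 0]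
    congr 1
    show _ = Fc (k+1) j
    simp only [Fc]
    apply PySem.List.foldl_congr_mem
    intro acc x hx
    simp

def Sc : Nat → Int
  | 0 => 0
  | k + 1 => Sc k + (PySem.List.pyRange 1 10 1).foldl (fun r d => r + Fc k d) 0

lemma dfsP_skip (l : List Char) : ∀ (k i : Nat) (j : Int),
    dfsP l k i j false false = some (Sc k) := by
  intro k
  induction k with
  | zero => intro i j; rfl
  | succ k ih =>
    intro i j
    simp only [dfsP, Bool.false_and, Bool.false_eq_true, if_false, ih (i+1) j]
    rw [show ((9:Int)+1) = 10 from rfl]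
    rw [foldl_optAdd (fun d => True ∨ 2 ≤ (d - j).natAbs)
      (fun d => dfsP l k (i + 1) d false true) (Fc k)
      _ (fun d _ _ => dfsP_free l k (i+1) d) (Sc k)]
    congr 1
    simp only [true_or, if_true]
    show _ = Sc (k+1)
    simp [Sc, PySem.List.foldl_add]

def FcRow (k : Nat) : List Int := (PySem.List.pyRange 0 10 1).map (Fc k)

lemma pr10' : PySem.List.pyRange 0 10 1 = [0,1,2,3,4,5,6,7,8,9] := by
  rw [PySem.List.pyRange_one]; simp [List.range_succ]

lemma rowNextB_eq (k : Nat) : rowNextB (FcRow k) = FcRow (k + 1) := by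
  simp only [rowNextB, FcRow, pr10', List.map]
  norm_num [PySem.List.enumerate_cons, PySem.List.enumerate_nil, List.foldl, Fc, pr10']

def rowListH : Nat → List (List Int)
  | 0 => []
  | m + 1 => FcRow m :: rowListH m

lemma fcrow0 : FcRow 0 = List.replicate 10 (1 : Int) := by rw [FcRow, pr10']; rfl

lemma fTab_loop : ∀ n : Nat,
    (PySem.List.pyRange 1 (((n + 1 : Nat)) : Int) 1).foldl
      (fun st _ => let q := rowNextB st.2; (st.1 ++ [q], q))
      ([List.replicate 10 (1 : Int)], List.replicate 10 (1 : Int))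
    = ((rowListH (n + 1)).reverse, FcRow n) := by
  intro n
  induction n with
  | zero =>
    rw [PySem.List.pyRange_one_eq_nil (by norm_num)]
    simp [rowListH, fcrow0]
  | succ n ih =>
    rw [show (((n + 2 : Nat)) : Int) = ((n + 1 : Nat) : Int) + 1 by push_cast; ring]
    rw [PySem.List.pyRange_one_succ_right (by push_cast; omega), List.foldl_append, ih]
    simp [rowNextB_eq, rowListH]

lemma fTabB_eq (n : Nat) : fTabB (n + 1) = (rowListH (n + 1)).reverse := by
  rw [fTabB, fTab_loop]

lemma pr19' : PySem.List.pyRange 1 10 1 = [1,2,3,4,5,6,7,8,9] := by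
  rw [PySem.List.pyRange_one]; simp [List.range_succ]

lemma g_row (k : Nat) : (PySem.List.slice (FcRow k) (some 1) none).foldl (fun t v => t + v) 0
    = (PySem.List.pyRange 1 10 1).foldl (fun r d => r + Fc k d) 0 := by
  simp only [FcRow, pr10', pr19', List.map]
  norm_num [PySem.List.slice, PySem.List.clampIdx, List.foldl]

lemma total_eq : ∀ m : Nat,
    ((rowListH m).reverse).foldl
      (fun acc row => acc + (PySem.List.slice row (some 1) none).foldl (fun t v => t + v) 0) 0
      = Sc m := by
  intro m
  rw [PySem.List.foldl_add _
    (fun row => (PySem.List.slice row (some 1) none).foldl (fun t v => t + v) 0) 0]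
  rw [List.map_reverse, List.sum_reverse]
  induction m with
  | zero => rfl
  | succ m ih =>
    simp only [rowListH, List.map_cons, List.sum_cons, Sc]
    rw [g_row m]
    omega

lemma tn0 : Int.toNat 0 = 0 := rfl

lemma tn1 : Int.toNat 1 = 1 := rfl

lemma tn2 : Int.toNat 2 = 2 := rfl

lemma tn3 : Int.toNat 3 = 3 := rfl

lemma tn4 : Int.toNat 4 = 4 := rfl

lemma tn5 : Int.toNat 5 = 5 := rfl

lemma tn6 : Int.toNat 6 = 6 := rfl

lemma tn7 : Int.toNat 7 = 7 := rfl

lemma tn8 : Int.toNat 8 = 8 := rfl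

lemma tn9 : Int.toNat 9 = 9 := rfl

lemma tn10 : Int.toNat 10 = 10 := rfl

lemma sums_eq (m : Nat) (j d : Int) (h0 : 0 ≤ d) (h9 : d ≤ 9) :
    (PySem.List.pyRange 0 d 1).foldl
        (fun r x => if 2 ≤ (x - j).natAbs then r + Fc m x else r) 0
      = (PySem.List.enumerate (PySem.List.slice (FcRow m) none (some d))).foldl
          (fun acc xv =>
            if (0 : Int) ≤ xv.1 ∧ 2 ≤ (xv.1 - j).natAbs then acc + xv.2 else acc) 0 := by
  interval_cases d <;>
    norm_num [PySem.List.pyRange_one, List.range_succ, List.foldl, PySem.List.slice,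
      PySem.List.clampIdx, PySem.List.enumerate_cons, PySem.List.enumerate_nil, FcRow, pr10',
      tn0, tn1, tn2, tn3, tn4, tn5, tn6, tn7, tn8, tn9, tn10, Function.comp, List.take_succ_cons, List.take_zero]

lemma sums_eq_first (m : Nat) (d : Int) (h0 : 0 ≤ d) (h9 : d ≤ 9) :
    (PySem.List.pyRange 1 d 1).foldl (fun r x => r + Fc m x) 0
      = (PySem.List.enumerate (PySem.List.slice (FcRow m) none (some d))).foldl
          (fun acc xv => if (1 : Int) ≤ xv.1 then acc + xv.2 else acc) 0 := by
  interval_cases d <;>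
    norm_num [PySem.List.pyRange_one, List.range_succ, List.foldl, PySem.List.slice,
      PySem.List.clampIdx, PySem.List.enumerate_cons, PySem.List.enumerate_nil, FcRow, pr10',
      tn0, tn1, tn2, tn3, tn4, tn5, tn6, tn7, tn8, tn9, tn10, Function.comp, List.take_succ_cons, List.take_zero]

def pvDigits : List Char := ['0','1','2','3','4','5','6','7','8','9']

lemma dig_ofChars : ∀ c ∈ pvDigits, PySem.Int.ofChars? [c] = some ((c.toNat : Int) - 48) := by
  intro c hc; fin_cases hc <;> rfl

lemma dig_bounds : ∀ c ∈ pvDigits, 0 ≤ (c.toNat : Int) - 48 ∧ (c.toNat : Int) - 48 ≤ 9 := by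
  intro c hc; fin_cases hc <;> constructor <;> decide

lemma dfsP_tight : ∀ (u pre : List Char) (j : Int),
    (∀ c ∈ u, c ∈ pvDigits) →
    dfsP (pre ++ u) u.length pre.length j true true
      = some (walkB (u.zip (rowListH u.length)) false j) := by
  intro u
  induction u with
  | nil => intro pre j _; rfl
  | cons c u' ih =>
    intro pre j hdig
    have hc : c ∈ pvDigits := hdig c (by simp)
    obtain ⟨hd0, hd9⟩ := dig_bounds c hc
    simp only [List.length_cons, dfsP, walkB, List.zip_cons_cons, rowListH,
      PySem.List.pyGet?_append_length pre u' c, Option.bind_some, dig_ofChars c hc]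
    simp only [if_true, Bool.false_eq_true, Bool.true_eq_false, false_or, if_false,
      Bool.not_false, Bool.true_and, decide_eq_true_eq]
    rw [PySem.List.pyRange_one_succ_right hd0, List.foldl_append]
    rw [foldl_optAdd (fun d => 2 ≤ (d - j).natAbs)
      (fun d => dfsP (pre ++ c :: u') u'.length (pre.length + 1) d
        (((↑c.toNat - 48 : Int)) == d) true) (Fc u'.length) _
      (by
        intro d hd _
        have hlt : d < (↑c.toNat - 48 : Int) := (PySem.List.mem_pyRange_one.mp hd).2
        have hb : (((↑c.toNat - 48 : Int)) == d) = false := by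
          simp [beq_eq_false_iff_ne]; omega
        simp only [hb, dfsP_free]) 0]
    have hih := ih (pre ++ [c]) ((↑c.toNat : Int) - 48) (fun x hx => hdig x (by simp [hx]))
    rw [List.append_assoc] at hih
    simp only [List.cons_append, List.nil_append, List.length_append, List.length_cons,
      List.length_nil] at hih
    simp only [List.foldl_cons, List.foldl_nil, Option.bind_some, beq_self_eq_true, hih]
    rw [← sums_eq u'.length j ((↑c.toNat : Int) - 48) hd0 hd9]
    by_cases h2 : 2 ≤ ((↑c.toNat - 48 : Int) - j).natAbs
    · rw [if_pos h2, if_neg (by omega)]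
      rfl
    · rw [if_neg h2, if_pos (by omega)]

lemma dig_pos : ∀ c ∈ pvDigits, c ≠ '0' → 1 ≤ (c.toNat : Int) - 48 := by
  intro c hc; fin_cases hc <;> simp

lemma solve_count (c : Char) (l : List Char)
    (hd : ∀ ch ∈ c :: l, ch ∈ pvDigits) (h0 : c = '0' → l = []) :
    dfsP (c :: l) (l.length + 1) 0 0 true false
      = some (countB (String.ofList (c :: l))) := by
  have hc : c ∈ pvDigits := hd c (by simp)
  obtain ⟨hd0, hd9⟩ := dig_bounds c hc
  by_cases hzero : c = '0'
  · subst hzero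
    rw [h0 rfl]
    decide
  · -- c ≠ '0', dc ≥ 1
    have hd1 : 1 ≤ (c.toNat : Int) - 48 := dig_pos c hc hzero
    -- LHS
    simp only [dfsP, Bool.false_eq_true, if_false, if_true, dfsP_skip]
    simp only [Nat.cast_zero, PySem.List.pyGet?_zero_cons, Option.bind_some, dig_ofChars c hc]
    rw [PySem.List.pyRange_one_succ_right hd1, List.foldl_append]
    rw [foldl_optAdd (fun d => True ∨ 2 ≤ (d - 0).natAbs)
      (fun d => dfsP (c :: l) l.length (0 + 1) d (true && (((c.toNat : Int) - 48) == d)) true)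
      (Fc l.length) _
      (by
        intro d hdm _
        have hlt : d < (c.toNat : Int) - 48 := (PySem.List.mem_pyRange_one.mp hdm).2
        have hb : (((c.toNat : Int) - 48) == d) = false := by
          simp [beq_eq_false_iff_ne]; omega
        simp only [hb, Bool.and_false, dfsP_free]) (Sc l.length)]
    have htight := dfsP_tight l [c] ((c.toNat : Int) - 48) (fun x hx => hd x (by simp [hx]))
    simp only [List.singleton_append, List.length_cons, List.length_nil] at htight
    simp only [List.foldl_cons, List.foldl_nil, Option.bind_some, beq_self_eq_true,
      Bool.and_true, true_or, if_true, htight, Option.map_some]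
    -- RHS
    have hne : String.ofList (c :: l) ≠ "0" := by
      intro heq
      have := congrArg String.toList heq
      simp only [String.toList_ofList] at this
      rw [show "0".toList = ['0'] from rfl] at this
      exact hzero (by injection this)
    simp only [countB, String.toList_ofList, List.length_cons, fTabB_eq l.length,
      if_neg hne, PySem.List.slice?_none_none_neg_one, Option.getD_some, List.reverse_reverse]
    rw [show rowListH (l.length + 1) = FcRow l.length :: rowListH l.length from rfl]
    rw [List.reverse_cons]
    simp only [PySem.List.slice_to_neg_one]
    rw [List.dropLast_concat, total_eq]
    rw [List.zip_cons_cons]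
    simp only [walkB, Bool.not_true, Bool.false_and, Bool.false_eq_true, if_false, if_true,
      true_or, and_true]
    rw [← sums_eq_first l.length ((c.toNat : Int) - 48) hd0 hd9]
    rw [PySem.List.foldl_add _ (fun d => Fc l.length d) (Sc l.length),
      PySem.List.foldl_add _ (fun d => Fc l.length d) 0]
    congr 1
    ring

lemma digitChar_mem : ∀ m : Nat, m < 10 → Nat.digitChar m ∈ pvDigits := by decide

lemma digitChar_ne : ∀ m : Nat, m < 10 → 0 < m → Nat.digitChar m ≠ '0' := by decide

lemma toDigitsCore_digits : ∀ (f n : Nat) (acc : List Char),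
    (∀ c ∈ acc, c ∈ pvDigits) → ∀ c ∈ Nat.toDigitsCore 10 f n acc, c ∈ pvDigits := by
  intro f
  induction f with
  | zero => intro n acc hacc; simpa [Nat.toDigitsCore] using hacc
  | succ f ihf =>
    intro n acc hacc
    rw [Nat.toDigitsCore]
    have hmem : ∀ c ∈ (n % 10).digitChar :: acc, c ∈ pvDigits := by
      intro x hx
      rcases hx with _ | hx
      · exact digitChar_mem _ (Nat.mod_lt _ (by norm_num))
      · exact hacc x (by assumption)
    split
    · exact hmem
    · exact ihf _ _ hmem

lemma toDigitsCore_head : ∀ (f n : Nat) (acc : List Char), 0 < n → n < f →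
    ∃ c t, Nat.toDigitsCore 10 f n acc = c :: t ∧ c ∈ pvDigits ∧ c ≠ '0' := by
  intro f
  induction f with
  | zero => intro n acc h1 h2; omega
  | succ f ihf =>
    intro n acc h1 h2
    rw [Nat.toDigitsCore]
    by_cases hdiv : n / 10 = 0
    · rw [if_pos hdiv]
      refine ⟨_, _, rfl, digitChar_mem _ (Nat.mod_lt _ (by norm_num)), ?_⟩
      have : n < 10 := by omega
      have : n % 10 = n := Nat.mod_eq_of_lt this
      rw [this]
      exact digitChar_ne n (by omega) h1
    · rw [if_neg hdiv]
      exact ihf (n / 10) _ (Nat.pos_of_ne_zero hdiv)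
        (by have := Nat.div_lt_self h1 (show 1 < 10 by norm_num); omega)

lemma toStr_digits (x : Int) (hx : 0 ≤ x) :
    ∃ c l, (PySem.Int.toStr x).toList = c :: l ∧ (∀ ch ∈ c :: l, ch ∈ pvDigits) ∧
      (c = '0' → l = []) := by
  rw [PySem.Int.toList_toStr, PySem.Int.toChars, if_neg (by omega)]
  by_cases hz : x.toNat = 0
  · rw [hz]
    have h00 : Nat.toDigits 10 0 = ['0'] := by
      rw [Nat.toDigits, Nat.toDigitsCore, if_pos (by norm_num)]
      norm_num
      rfl
    refine ⟨'0', [], h00, ?_, fun _ => rfl⟩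
    intro ch hch
    simp only [List.mem_singleton] at hch
    subst hch
    exact List.mem_cons_self
  · obtain ⟨c, t, heq, hmem, hne⟩ :=
      toDigitsCore_head (x.toNat + 1) x.toNat [] (Nat.pos_of_ne_zero hz) (by omega)
    refine ⟨c, t, heq, ?_, fun h => absurd h hne⟩
    intro ch hch
    rw [← heq] at hch
    exact toDigitsCore_digits _ _ [] (by simp) ch hch

lemma solveA_eq_countB (x : Int) (hx : 0 ≤ x) :
    dfsP (PySem.Int.toStr x).toList (PySem.Int.toStr x).toList.length 0 0 true false
      = some (countB (PySem.Int.toStr x)) := by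
  obtain ⟨c, l, hTL, hdig, h0⟩ := toStr_digits x hx
  rw [hTL, List.length_cons, solve_count c l hdig h0, ← hTL, String.ofList_toList]

lemma solveA_eq (x : Int) (hx : 0 ≤ x) :
    solveA (PySem.Int.toStr x) = some (countB (PySem.Int.toStr x)) := by
  unfold solveA
  rw [(dfsA_memo (PySem.Int.toStr x).toList (PySem.Int.toStr x).toList.length
      (PySem.Int.toStr x).toList.length 0 0 true false PySem.Dict.empty (by omega)
      (by intro i j lim num v hv; rw [PySem.Dict.get?_empty] at hv; cases hv)).1]
  exact solveA_eq_countB x hx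

-- ===== VERDICT (by name: the statement is the Claim_ definition above) =====
theorem windyNumbers_spec : Claim_equal_windyNumbers := by
  intro a b _ hpre
  obtain ⟨h1, h2⟩ := hpre
  unfold Spec_windyNumbers windyNumbers windyNumbers_alt
  rw [solveA_eq b h2, solveA_eq (a - 1) (by omega)]
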